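-- pv_equiv track=rewrite | github.com/donghyeok1/algorithm | programmers/programmers07.py | solution
-- ===== SOURCE A (Python) =====
-- def solution(order):
--     answer = 0
--     stack = []
--     start = 1
--     for box in order:
--         if box not in stack:
--             for i in range(start, box):
--                 stack.append(i)
--             start = box + 1
--             answer += 1
--         else:
--             if stack[-1] == box:
--                 stack.pop()
--                 answer += 1
--             else:
--                 break
--     return answer
-- ===== SOURCE B (Python) =====
-- def solution(order):
--     # Alternating-phase simulation over a run-length store: a load phase sends
--     # the longest run of fresh boxes straight onto the truck (recording the
--     # skipped belt boxes as a single interval), an unload phase pops the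
--     # longest run of requests matching the store's suffix; the answer is the
--     # index at which neither phase can advance.
--     n = len(order)
--     runs = []          # boxes set aside, as intervals (lo, hi); top = runs[-1]
--     start = 1          # next box to come off the belt
--
--     def fresh(b):
--         return all(not (lo <= b <= hi) for lo, hi in runs)
--
--     i = 0
--     while True:
--         # load phase: maximal run of fresh boxes
--         while i < n and fresh(order[i]):
--             b = order[i]
--             if start < b:
--                 runs.append((start, b - 1))
--             start = b + 1
--             i += 1
--         # unload phase: maximal run matching the store's suffix
--         progressed = False
--         while i < n and runs and runs[-1][1] == order[i]:
--             lo, hi = runs.pop()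
--             if lo < hi:
--                 runs.append((lo, hi - 1))
--             i += 1
--             progressed = True
--         if i >= n or not progressed:
--             return i
-- ===== Notes on version B (the rewrite author's own statement) =====
-- stated objective: alternative
-- what changed: A's per-box loop that counts, materialises range(start,box) onto an explicit stack of box numbers, pops one element or breaks is replaced by an alternating-phase scan: a load phase consumes the longest run of fresh boxes (recording skipped belt boxes as one (lo,hi) interval), an unload phase consumes the longest run matching the interval store's suffix, and the result is the index at which neither phase advances.
import Mathlib
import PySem

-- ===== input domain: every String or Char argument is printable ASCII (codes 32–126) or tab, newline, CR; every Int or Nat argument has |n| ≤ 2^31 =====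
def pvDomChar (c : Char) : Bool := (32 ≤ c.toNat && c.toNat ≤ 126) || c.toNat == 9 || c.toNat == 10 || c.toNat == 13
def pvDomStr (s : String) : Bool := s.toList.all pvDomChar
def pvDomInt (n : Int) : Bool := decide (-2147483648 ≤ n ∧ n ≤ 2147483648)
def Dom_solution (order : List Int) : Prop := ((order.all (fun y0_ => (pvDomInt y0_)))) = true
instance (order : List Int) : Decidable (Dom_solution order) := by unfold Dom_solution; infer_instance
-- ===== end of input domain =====

-- B replaces A's per-box count/pop/break loop over an explicit stack of box
-- numbers by an alternating-phase scan (maximal load run, then maximal unload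
-- run) over a run-length store of intervals, returning the index where the
-- process gets stuck (objective: alternative).

-- ===== PORT A =====
-- loop state: (answer, stack, start); early `break` returns the accumulated answer
def solutionGo : List Int → Int → List Int → Int → Int
  | [], ans, _stack, _start => ans
  | box :: rest, ans, stack, start =>
    if box ∉ stack then
      solutionGo rest (ans + 1) (stack ++ PySem.List.pyRange start box 1) (box + 1)
    else if PySem.List.pyGet? stack (-1) = some box then
      solutionGo rest (ans + 1) stack.dropLast start
    else ans

def solution (order : List Int) : Int := solutionGo order 0 [] 1

-- ===== PORT B =====
-- fresh(b): b not covered by any stored interval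
def altFresh (b : Int) (runs : List (Int × Int)) : Bool :=
  runs.all (fun p => !(decide (p.1 ≤ b) && decide (b ≤ p.2)))

-- load phase: consume the maximal run of fresh boxes; returns (#consumed, rest, runs, start)
def altLoad : List Int → List (Int × Int) → Int → Int × List Int × List (Int × Int) × Int
  | [], runs, start => (0, [], runs, start)
  | b :: rest, runs, start =>
    if altFresh b runs then
      let r := altLoad rest (if start < b then runs ++ [(start, b - 1)] else runs) (b + 1)
      (r.1 + 1, r.2)
    else (0, b :: rest, runs, start)

-- unload phase: consume the maximal run matching the store's suffix; returns (#consumed, rest, runs)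
def altUnload : List Int → List (Int × Int) → Int × List Int × List (Int × Int)
  | [], runs => (0, [], runs)
  | b :: rest, runs =>
    match runs.getLast? with
    | some (lo, hi) =>
      if hi = b then
        let r := altUnload rest (if lo < hi then runs.dropLast ++ [(lo, hi - 1)] else runs.dropLast)
        (r.1 + 1, r.2)
      else (0, b :: rest, runs)
    | none => (0, b :: rest, runs)

-- one-step unfolding equations and length bounds: cited by altOuter's decreasing_by
lemma altUnload_cons_none (b : Int) (rest : List Int) (runs : List (Int × Int))
    (hL : runs.getLast? = none) : altUnload (b :: rest) runs = (0, b :: rest, runs) := by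
  conv_lhs => rw [altUnload]
  rw [hL]

lemma altUnload_cons_pop (b : Int) (rest : List Int) (runs : List (Int × Int)) (lo hi : Int)
    (hL : runs.getLast? = some (lo, hi)) (hb : hi = b) :
    altUnload (b :: rest) runs
      = ((altUnload rest (if lo < hi then runs.dropLast ++ [(lo, hi - 1)] else runs.dropLast)).1 + 1,
         (altUnload rest (if lo < hi then runs.dropLast ++ [(lo, hi - 1)] else runs.dropLast)).2) := by
  conv_lhs => rw [altUnload]
  rw [hL]
  dsimp only
  rw [if_pos hb]

lemma altUnload_cons_stop (b : Int) (rest : List Int) (runs : List (Int × Int)) (lo hi : Int)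
    (hL : runs.getLast? = some (lo, hi)) (hb : ¬ hi = b) :
    altUnload (b :: rest) runs = (0, b :: rest, runs) := by
  conv_lhs => rw [altUnload]
  rw [hL]
  dsimp only
  rw [if_neg hb]

lemma altLoad_rest_length_le : ∀ (xs : List Int) (runs : List (Int × Int)) (start : Int),
    ((altLoad xs runs start).2.1).length ≤ xs.length
  | [], _, _ => le_refl _
  | b :: rest, runs, start => by
    unfold altLoad
    by_cases h : altFresh b runs
    · simp only [h, if_true]
      exact le_trans (altLoad_rest_length_le rest _ _) (by simp)
    · simp [h]

lemma altUnload_rest_length_le : ∀ (xs : List Int) (runs : List (Int × Int)),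
    ((altUnload xs runs).2.1).length ≤ xs.length
  | [], _ => le_refl _
  | b :: rest, runs => by
    cases hL : runs.getLast? with
    | none => rw [altUnload_cons_none b rest runs hL]
    | some p =>
      obtain ⟨lo, hi⟩ := p
      by_cases hb : hi = b
      · rw [altUnload_cons_pop b rest runs lo hi hL hb]
        exact le_trans (altUnload_rest_length_le rest _) (by simp)
      · rw [altUnload_cons_stop b rest runs lo hi hL hb]

lemma altUnload_rest_lt (xs : List Int) (runs : List (Int × Int))
    (h : (altUnload xs runs).1 ≠ 0) : ((altUnload xs runs).2.1).length < xs.length := by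
  cases xs with
  | nil => simp [altUnload] at h
  | cons b rest =>
    cases hL : runs.getLast? with
    | none => rw [altUnload_cons_none b rest runs hL] at h; simp at h
    | some p =>
      obtain ⟨lo, hi⟩ := p
      by_cases hb : hi = b
      · rw [altUnload_cons_pop b rest runs lo hi hL hb]
        have := altUnload_rest_length_le rest
          (if lo < hi then runs.dropLast ++ [(lo, hi - 1)] else runs.dropLast)
        simp only [List.length_cons]
        omega
      · rw [altUnload_cons_stop b rest runs lo hi hL hb] at h
        simp at h

-- outer loop: alternate phases until no element is left or no progress was made
def altOuter (xs : List Int) (runs : List (Int × Int)) (start acc : Int) : Int :=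
  let l := altLoad xs runs start
  let u := altUnload l.2.1 l.2.2.1
  if u.2.1.isEmpty || u.1 == 0 then acc + l.1 + u.1
  else altOuter u.2.1 u.2.2 l.2.2.2 (acc + l.1 + u.1)
  termination_by xs.length
  decreasing_by
    have h1 := altLoad_rest_length_le xs runs start
    have h2 := altUnload_rest_lt (altLoad xs runs start).2.1 (altLoad xs runs start).2.2.1
      (by simp only [Bool.or_eq_true, List.isEmpty_iff, beq_iff_eq] at *; tauto)
    omega

def solution_alt (order : List Int) : Int := altOuter order [] 1 0

-- ===== PRECONDITION & SPEC =====
def Spec_solution (order : List Int) (out : Int) : Prop := out = solution_alt order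
instance (order : List Int) (out : Int) : Decidable (Spec_solution order out) := by unfold Spec_solution; infer_instance

-- ===== CLAIM (what is proved, stated in full; the proofs are below) =====
def Claim_equal_solution : Prop := ∀ (order : List Int), Dom_solution order → Spec_solution order (solution order)

-- ===== LEMMAS AND PROOFS =====

lemma altUnload_count_nonneg : ∀ (xs : List Int) (runs : List (Int × Int)),
    0 ≤ (altUnload xs runs).1
  | [], _ => le_refl _
  | b :: rest, runs => by
    cases hL : runs.getLast? with
    | none => rw [altUnload_cons_none b rest runs hL]
    | some p =>
      obtain ⟨lo, hi⟩ := p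
      by_cases hb : hi = b
      · rw [altUnload_cons_pop b rest runs lo hi hL hb]
        have := altUnload_count_nonneg rest
          (if lo < hi then runs.dropLast ++ [(lo, hi - 1)] else runs.dropLast)
        dsimp only
        omega
      · rw [altUnload_cons_stop b rest runs lo hi hL hb]

-- concatenation of the intervals' ranges: the abstraction from B's store to A's stack
def pvFlat (runs : List (Int × Int)) : List Int :=
  (runs.map (fun p => PySem.List.pyRange p.1 (p.2 + 1) 1)).flatten

lemma pvFlat_append (rs ss : List (Int × Int)) :
    pvFlat (rs ++ ss) = pvFlat rs ++ pvFlat ss := by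
  simp [pvFlat]

lemma mem_pvFlat (box : Int) (runs : List (Int × Int)) :
    box ∈ pvFlat runs ↔ ∃ p ∈ runs, p.1 ≤ box ∧ box ≤ p.2 := by
  simp only [pvFlat, List.mem_flatten, List.mem_map]
  constructor
  · rintro ⟨l, ⟨p, hp, rfl⟩, hm⟩
    rw [PySem.List.mem_pyRange_one] at hm
    exact ⟨p, hp, hm.1, by omega⟩
  · rintro ⟨p, hp, h1, h2⟩
    exact ⟨_, ⟨p, hp, rfl⟩, by rw [PySem.List.mem_pyRange_one]; omega⟩

lemma altFresh_iff (b : Int) (runs : List (Int × Int)) :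
    altFresh b runs = true ↔ b ∉ pvFlat runs := by
  rw [mem_pvFlat]
  simp [altFresh, List.all_eq_true]
  constructor
  · intro h x y hxy hle
    rcases h x y hxy with h' | h'
    · omega
    · exact h'
  · intro h x y hxy
    by_cases hle : x ≤ b
    · exact Or.inr (h x y hxy hle)
    · exact Or.inl (by omega)

-- invariant: every interval of B's store is nonempty
def pvInv (runs : List (Int × Int)) : Prop := ∀ p ∈ runs, p.1 ≤ p.2

lemma pvFlat_concat_split (rs : List (Int × Int)) (lo hi : Int) (h : lo ≤ hi) :
    pvFlat (rs ++ [(lo, hi)]) = (pvFlat rs ++ PySem.List.pyRange lo hi 1) ++ [hi] := by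
  rw [pvFlat_append, List.append_assoc]
  simp [pvFlat, PySem.List.pyRange_one_succ_right h]

lemma pyRange_split_pred (lo hi : Int) (h : lo < hi) :
    PySem.List.pyRange lo hi 1 = PySem.List.pyRange lo (hi - 1) 1 ++ [hi - 1] := by
  nth_rewrite 1 [show hi = (hi - 1) + 1 by ring]
  exact PySem.List.pyRange_one_succ_right (by omega)

-- A breaks immediately when the head is stored but is not the top of the stack
lemma pvStuck (b : Int) (t : List Int) (runs : List (Int × Int)) (start ans : Int)
    (hInv : pvInv runs) (hmem : b ∈ pvFlat runs)
    (htop : ∀ lo hi, runs.getLast? = some (lo, hi) → hi ≠ b) :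
    solutionGo (b :: t) ans (pvFlat runs) start = ans := by
  have hne : runs ≠ [] := by rintro rfl; simp [pvFlat] at hmem
  obtain ⟨rs, ⟨lo, hi⟩, rfl⟩ : ∃ rs p, runs = rs ++ [p] :=
    ⟨runs.dropLast, runs.getLast hne, (List.dropLast_append_getLast hne).symm⟩
  have hlohi : lo ≤ hi := hInv (lo, hi) (by simp)
  have hflat := pvFlat_concat_split rs lo hi hlohi
  have hlast : PySem.List.pyGet? (pvFlat (rs ++ [(lo, hi)])) (-1) = some hi := by
    rw [hflat]; exact PySem.List.pyGet?_neg_one_append_singleton _ _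
  have hhib : hi ≠ b := htop lo hi (by simp)
  simp only [solutionGo, hmem, not_true, if_false, hlast, Option.some.injEq]
  simp [hhib]

-- load phase: preserves the invariant, advances A step for step, stops at a stored head
lemma pvLoad_step : ∀ (xs : List Int) (runs : List (Int × Int)) (start : Int), pvInv runs →
    pvInv (altLoad xs runs start).2.2.1 ∧
    (∀ ans, solutionGo xs ans (pvFlat runs) start
        = solutionGo (altLoad xs runs start).2.1 (ans + (altLoad xs runs start).1)
            (pvFlat (altLoad xs runs start).2.2.1) (altLoad xs runs start).2.2.2) ∧
    ((altLoad xs runs start).2.1 = [] ∨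
      ∃ b t, (altLoad xs runs start).2.1 = b :: t ∧ altFresh b (altLoad xs runs start).2.2.1 = false)
  | [], runs, start, hInv => by
    refine ⟨hInv, fun ans => by simp [altLoad], Or.inl rfl⟩
  | b :: rest, runs, start, hInv => by
    by_cases hf : altFresh b runs
    · -- fresh head: A takes the push branch
      have hmem : b ∉ pvFlat runs := (altFresh_iff b runs).mp hf
      set runs' := if start < b then runs ++ [(start, b - 1)] else runs with hruns'
      have hInv' : pvInv runs' := by
        intro p hp
        rw [hruns'] at hp
        split at hp
        · rcases List.mem_append.mp hp with h | h
          · exact hInv p h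
          · simp only [List.mem_singleton] at h; subst h; dsimp; omega
        · exact hInv p hp
      have hflat' : pvFlat runs' = pvFlat runs ++ PySem.List.pyRange start b 1 := by
        rw [hruns']
        by_cases hs : start < b
        · rw [if_pos hs, pvFlat_append]
          congr 1
          simp [pvFlat]
        · rw [if_neg hs, PySem.List.pyRange_one_eq_nil (by omega), List.append_nil]
      obtain ⟨ih1, ih2, ih3⟩ := pvLoad_step rest runs' (b + 1) hInv'
      refine ⟨?_, ?_, ?_⟩
      · unfold altLoad; rw [if_pos hf, ← hruns']; exact ih1
      · intro ans
        unfold altLoad; rw [if_pos hf, ← hruns']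
        simp only [solutionGo, hmem, not_false_iff, if_true]
        rw [← hflat', ih2 (ans + 1)]
        congr 1
        omega
      · unfold altLoad; rw [if_pos hf, ← hruns']; exact ih3
    · -- stored head: load phase stops here
      have hf' : altFresh b runs = false := by simpa using hf
      refine ⟨?_, ?_, Or.inr ⟨b, rest, ?_, ?_⟩⟩ <;>
        simp [altLoad, hf', hInv]

-- unload phase: preserves the invariant and advances A step for step
lemma pvUnload_step : ∀ (xs : List Int) (runs : List (Int × Int)), pvInv runs →
    pvInv (altUnload xs runs).2.2 ∧
    (∀ ans start, solutionGo xs ans (pvFlat runs) start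
        = solutionGo (altUnload xs runs).2.1 (ans + (altUnload xs runs).1)
            (pvFlat (altUnload xs runs).2.2) start)
  | [], runs, hInv => ⟨hInv, fun ans start => by simp [altUnload]⟩
  | b :: rest, runs, hInv => by
    cases hL : runs.getLast? with
    | none =>
      rw [altUnload_cons_none b rest runs hL]
      exact ⟨hInv, fun ans start => by simp⟩
    | some p =>
      obtain ⟨lo, hi⟩ := p
      by_cases hb : hi = b
      · -- top matches: A takes the pop branch
        have hne : runs ≠ [] := by rintro rfl; simp at hL
        obtain ⟨rs, rfl⟩ : ∃ rs, runs = rs ++ [(lo, hi)] := by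
          refine ⟨runs.dropLast, ?_⟩
          conv_lhs => rw [← List.dropLast_append_getLast hne]
          rw [show runs.getLast hne = (lo, hi) from by
            rw [← Option.some_inj, ← List.getLast?_eq_some_getLast]; exact hL]
        have hlohi : lo ≤ hi := hInv (lo, hi) (by simp)
        have hdl : (rs ++ [(lo, hi)]).dropLast = rs := List.dropLast_concat ..
        set runs' := if lo < hi then (rs ++ [(lo, hi)]).dropLast ++ [(lo, hi - 1)]
            else (rs ++ [(lo, hi)]).dropLast with hruns'
        have hstep := altUnload_cons_pop b rest (rs ++ [(lo, hi)]) lo hi hL hb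
        rw [← hruns'] at hstep
        have hInv' : pvInv runs' := by
          intro q hq
          rw [hruns', hdl] at hq
          split at hq
          · rcases List.mem_append.mp hq with h | h
            · exact hInv q (List.mem_append_left _ h)
            · simp only [List.mem_singleton] at h; subst h; dsimp; omega
          · exact hInv q (List.mem_append_left _ hq)
        obtain ⟨ih1, ih2⟩ := pvUnload_step rest runs' hInv'
        have hflat := pvFlat_concat_split rs lo hi hlohi
        have hmem : b ∈ pvFlat (rs ++ [(lo, hi)]) := by
          rw [mem_pvFlat]
          exact ⟨(lo, hi), by simp, by omega, by omega⟩
        have hlast : PySem.List.pyGet? (pvFlat (rs ++ [(lo, hi)])) (-1) = some hi := by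
          rw [hflat]; exact PySem.List.pyGet?_neg_one_append_singleton _ _
        have hdrop : (pvFlat (rs ++ [(lo, hi)])).dropLast
            = pvFlat rs ++ PySem.List.pyRange lo hi 1 := by
          rw [hflat]; exact List.dropLast_concat ..
        have hflat' : pvFlat runs' = pvFlat rs ++ PySem.List.pyRange lo hi 1 := by
          rw [hruns', hdl]
          by_cases hlb : lo < hi
          · rw [if_pos hlb, pvFlat_concat_split rs lo (hi - 1) (by omega),
              pyRange_split_pred lo hi hlb, List.append_assoc]
          · rw [if_neg hlb, PySem.List.pyRange_one_eq_nil (by omega), List.append_nil]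
        refine ⟨?_, ?_⟩
        · rw [hstep]; exact ih1
        · intro ans start
          rw [hstep]
          simp only [solutionGo, hmem, not_true, if_false, hlast, Option.some.injEq]
          rw [if_pos hb]
          rw [hdrop, ← hflat', ih2 (ans + 1) start]
          congr 1
          omega
      · -- top does not match: unload phase stops here
        rw [altUnload_cons_stop b rest runs lo hi hL hb]
        exact ⟨hInv, fun ans start => by simp⟩

-- a no-progress unload phase leaves everything unchanged
lemma pvUnload_zero (xs : List Int) (runs : List (Int × Int))
    (h : (altUnload xs runs).1 = 0) :
    (altUnload xs runs).2.1 = xs ∧ (altUnload xs runs).2.2 = runs := by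
  cases xs with
  | nil => simp [altUnload]
  | cons b rest =>
    cases hL : runs.getLast? with
    | none => rw [altUnload_cons_none b rest runs hL]; exact ⟨rfl, rfl⟩
    | some p =>
      obtain ⟨lo, hi⟩ := p
      by_cases hb : hi = b
      · exfalso
        rw [altUnload_cons_pop b rest runs lo hi hL hb] at h
        have := altUnload_count_nonneg rest
          (if lo < hi then runs.dropLast ++ [(lo, hi - 1)] else runs.dropLast)
        dsimp only at h
        omega
      · rw [altUnload_cons_stop b rest runs lo hi hL hb]
        exact ⟨rfl, rfl⟩

-- main loop invariant: A's loop on the flattened store equals B's phase loop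
lemma pvMain : ∀ (n : Nat) (xs : List Int), xs.length ≤ n →
    ∀ (runs : List (Int × Int)) (start ans : Int), pvInv runs →
    solutionGo xs ans (pvFlat runs) start = altOuter xs runs start ans := by
  intro n
  induction n with
  | zero =>
    intro xs hlen runs start ans _
    have : xs = [] := List.eq_nil_of_length_eq_zero (by omega)
    subst this
    simp [solutionGo, altOuter, altLoad, altUnload]
  | succ n ih =>
    intro xs hlen runs start ans hInv
    obtain ⟨hInvL, hstepL, hstopL⟩ := pvLoad_step xs runs start hInv
    obtain ⟨hInvU, hstepU⟩ := pvUnload_step (altLoad xs runs start).2.1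
      (altLoad xs runs start).2.2.1 hInvL
    rw [altOuter]
    set l := altLoad xs runs start with hl
    set u := altUnload l.2.1 l.2.2.1 with hu
    rw [hstepL ans, hstepU (ans + l.1) l.2.2.2]
    by_cases hstop : u.2.1.isEmpty || u.1 == 0
    · rw [if_pos hstop]
      rcases Bool.or_eq_true_iff.mp hstop with hE | hZ
      · -- no element left
        rw [List.isEmpty_iff.mp hE]
        simp [solutionGo]
      · -- no progress: the head is stored but not on top, so A breaks
        have hz : u.1 = 0 := by simpa using hZ
        obtain ⟨hrest, hruns⟩ := pvUnload_zero l.2.1 l.2.2.1 hz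
        rw [← hu] at hrest hruns
        rcases hstopL with hNil | ⟨b, t, hcons, hnf⟩
        · rw [hrest, hNil]
          simp [solutionGo]
        · have hmem : b ∈ pvFlat l.2.2.1 := by
            by_contra hC
            rw [← altFresh_iff] at hC
            simp [hC] at hnf
          rw [hrest, hruns, hcons, hz,
            pvStuck b t l.2.2.1 l.2.2.2 (ans + l.1 + 0) hInvL hmem ?_]
          -- the top (if any) differs from b, else the unload count were positive
          intro lo hi hLast hhb
          have : (altUnload (b :: t) l.2.2.1).1 ≠ 0 := by
            rw [altUnload_cons_pop b t l.2.2.1 lo hi hLast hhb]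
            have := altUnload_count_nonneg t
              (if lo < hi then l.2.2.1.dropLast ++ [(lo, hi - 1)] else l.2.2.1.dropLast)
            dsimp only
            omega
          rw [← hcons] at this
          exact this hz
    · rw [if_neg hstop]
      have hz : u.1 ≠ 0 := by
        intro h
        apply hstop
        simp [h]
      have hlt : u.2.1.length < xs.length := by
        have h1 := altLoad_rest_length_le xs runs start
        rw [← hl] at h1
        have h2 := altUnload_rest_lt l.2.1 l.2.2.1 (by rw [← hu]; exact hz)
        rw [← hu] at h2
        omega
      rw [ih u.2.1 (by omega) u.2.2 l.2.2.2 (ans + l.1 + u.1) hInvU]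

-- ===== VERDICT (by name: the statement is the Claim_ definition above) =====
theorem solution_spec : Claim_equal_solution := by
  intro order _
  unfold Spec_solution solution solution_alt
  have := pvMain order.length order (le_refl _) [] 1 0 (by intro p hp; simp at hp)
  simpa [pvFlat] using this
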